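-- pv_equiv track=rewrite | github.com/happyXinx/Instruction-Reverse-Engineering | instruction_template_construct.py | get_top_trace
-- ===== SOURCE A (Python) =====
-- def get_top_trace(trace, top_index):
--     top_trace = [0] * len(top_index)
--     cnt_j = 0
--     for j in range(len(trace)):
--         if j in top_index:
--             top_trace[cnt_j] = trace[j]
--             cnt_j += 1
--     return top_trace
-- ===== SOURCE B (Python) =====
-- def get_top_trace(trace, top_index):
--     valid = sorted(i for i in set(top_index) if 0 <= i < len(trace))
--     result = [trace[i] for i in valid]
--     result += [0] * (len(top_index) - len(result))
--     return result
-- ===== Notes on version B (the rewrite author's own statement) =====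
-- stated objective: faster
-- what changed: Instead of scanning every trace position and testing membership in top_index at each step (quadratic), B collects the distinct in-range indices from top_index once, sorts them, indexes trace directly, and pads with zeros to len(top_index).
import Mathlib
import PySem

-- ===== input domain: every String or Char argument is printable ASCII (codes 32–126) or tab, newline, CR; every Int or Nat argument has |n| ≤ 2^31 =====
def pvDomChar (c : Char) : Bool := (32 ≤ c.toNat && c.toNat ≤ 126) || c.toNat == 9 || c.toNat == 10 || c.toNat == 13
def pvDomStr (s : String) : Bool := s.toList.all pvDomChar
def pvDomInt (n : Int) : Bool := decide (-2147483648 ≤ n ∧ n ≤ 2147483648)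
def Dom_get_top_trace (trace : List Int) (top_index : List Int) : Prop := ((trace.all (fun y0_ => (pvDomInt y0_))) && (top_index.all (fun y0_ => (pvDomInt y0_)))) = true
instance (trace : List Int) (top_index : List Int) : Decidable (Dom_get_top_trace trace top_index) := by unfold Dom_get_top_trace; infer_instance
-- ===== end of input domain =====

-- B replaces A's scan of every trace position (with a linear membership test per position)
-- by collecting the wanted in-range indices once, sorting them, indexing directly, and padding
-- with zeros; objective: faster (no per-position membership scan; measured), same return value.

-- ===== PORT A =====
-- for j in range(len(trace)): if j in top_index: top_trace[cnt_j] = trace[j]; cnt_j += 1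
def get_top_trace (trace : List Int) (top_index : List Int) : List Int :=
  ((PySem.List.pyRange 0 (trace.length : Int) 1).foldl
    (fun (st : List Int × Int) j =>
      if top_index.contains j then
        (PySem.List.pySetD st.1 st.2 (PySem.List.pyGetD trace j 0), st.2 + 1)
      else st)
    (List.replicate top_index.length 0, 0)).1

-- ===== PORT B =====
-- valid = sorted(i for i in set(top_index) if 0 <= i < len(trace));
-- result = [trace[i] for i in valid]; result += [0] * (len(top_index) - len(result))
def get_top_trace_alt (trace : List Int) (top_index : List Int) : List Int :=
  let valid := PySem.List.sorted
    ((PySem.Set.ofList top_index).filter (fun i => decide (0 ≤ i) && decide (i < (trace.length : Int))))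
    (fun x => x) false
  let result := valid.map (fun i => PySem.List.pyGetD trace i 0)
  result ++ List.replicate (top_index.length - result.length) 0

-- ===== PRECONDITION & SPEC =====
def Spec_get_top_trace (trace : List Int) (top_index : List Int) (out : List Int) : Prop := out = get_top_trace_alt trace top_index
instance (trace : List Int) (top_index : List Int) (out : List Int) : Decidable (Spec_get_top_trace trace top_index out) := by unfold Spec_get_top_trace; infer_instance

-- ===== CLAIM (what is proved, stated in full; the proofs are below) =====
def Claim_equal_get_top_trace : Prop := ∀ (trace : List Int) (top_index : List Int), Dom_get_top_trace trace top_index → Spec_get_top_trace trace top_index (get_top_trace trace top_index)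

-- ===== LEMMAS AND PROOFS =====

-- the ascending in-range indices A selects
def pvSel (trace : List Int) (top_index : List Int) : List Int :=
  (PySem.List.pyRange 0 (trace.length : Int) 1).filter (fun j => top_index.contains j)

-- invariant of A's loop: writing values at cnt_j into a zero tail appends them in order
theorem foldA_char (c : Int → Bool) (f : Int → Int) (L : List Int) :
    ∀ (pre : List Int) (m : Nat), ((L.filter c).length ≤ m) →
    ((L.foldl
      (fun (st : List Int × Int) j =>
        if c j then (PySem.List.pySetD st.1 st.2 (f j), st.2 + 1) else st)
      (pre ++ List.replicate m 0, (pre.length : Int))).1)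
    = pre ++ (L.filter c).map f ++ List.replicate (m - (L.filter c).length) 0 := by
  induction L with
  | nil => intro pre m _; simp
  | cons j L ih =>
    intro pre m hm
    rw [List.foldl_cons]
    by_cases hc : c j
    · rw [if_pos hc]
      rw [List.filter_cons_of_pos hc] at hm ⊢
      obtain ⟨m', rfl⟩ : ∃ m', m = m' + 1 := by
        cases m with
        | zero => simp at hm
        | succ k => exact ⟨k, rfl⟩
      have hset : PySem.List.pySetD (pre ++ List.replicate (m' + 1) (0 : Int)) ((pre.length : Int))
          (f j) = (pre ++ [f j]) ++ List.replicate m' 0 := by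
        rw [PySem.List.pySetD_natCast]
        rw [List.set_append_right _ _ (le_refl pre.length)]
        simp [List.replicate_succ]
      have hlen : ((pre.length : Int) + 1) = (((pre ++ [f j]).length : Nat) : Int) := by simp
      simp only [hset, hlen]
      rw [ih (pre ++ [f j]) m' (by simpa using hm)]
      simp
    · rw [if_neg hc]
      rw [List.filter_cons_of_neg hc] at hm ⊢
      exact ih pre m hm

theorem pvSel_nodup (trace top_index : List Int) : (pvSel trace top_index).Nodup :=
  (PySem.List.nodup_pyRange_one 0 (trace.length : Int)).filter _

theorem pvSel_pairwise (trace top_index : List Int) : (pvSel trace top_index).Pairwise (· < ·) :=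
  (PySem.List.pairwise_lt_pyRange_one 0 (trace.length : Int)).filter _

theorem mem_pvSel (trace top_index : List Int) (x : Int) :
    x ∈ pvSel trace top_index ↔ (x ∈ top_index ∧ 0 ≤ x ∧ x < (trace.length : Int)) := by
  simp [pvSel, List.mem_filter, PySem.List.mem_pyRange_one]
  tauto

theorem pvSel_len_le (trace top_index : List Int) :
    (pvSel trace top_index).length ≤ top_index.length := by
  have hsub : pvSel trace top_index ⊆ PySem.Set.ofList top_index := by
    intro x hx
    rw [PySem.Set.mem_ofList]
    exact ((mem_pvSel trace top_index x).mp hx).1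
  have h1 := (List.subperm_of_subset (pvSel_nodup trace top_index) hsub).length_le
  exact le_trans h1 (PySem.Set.length_ofList_le top_index)

-- B's sorted filtered set IS A's ascending selection
theorem valid_eq_pvSel (trace top_index : List Int) :
    PySem.List.sorted
      ((PySem.Set.ofList top_index).filter (fun i => decide (0 ≤ i) && decide (i < (trace.length : Int))))
      (fun x => x) false = pvSel trace top_index := by
  apply PySem.List.sorted_eq_of_perm_of_pairwise_lt
  · apply (List.perm_ext_iff_of_nodup (pvSel_nodup trace top_index)
      ((PySem.Set.nodup_ofList top_index).filter _)).mpr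
    intro x
    simp [mem_pvSel, List.mem_filter, PySem.Set.mem_ofList]
  · exact pvSel_pairwise trace top_index

theorem get_top_trace_eq (trace top_index : List Int) :
    get_top_trace trace top_index
    = (pvSel trace top_index).map (fun j => PySem.List.pyGetD trace j 0)
      ++ List.replicate (top_index.length - (pvSel trace top_index).length) 0 := by
  have h := foldA_char (fun j => top_index.contains j) (fun j => PySem.List.pyGetD trace j 0)
    (PySem.List.pyRange 0 (trace.length : Int) 1) [] top_index.length (pvSel_len_le trace top_index)
  simpa [get_top_trace, pvSel] using h

-- ===== VERDICT (by name: the statement is the Claim_ definition above) =====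
theorem get_top_trace_spec : Claim_equal_get_top_trace := by
  intro trace top_index _
  unfold Spec_get_top_trace get_top_trace_alt
  rw [valid_eq_pvSel, get_top_trace_eq]
  simp
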